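-- pv_equiv track=rewrite | github.com/avihay30/PythonProjects | Python_practices/HW_Malam/HW04/q1.py | warp_perimeter_of_matrix
-- ===== SOURCE A (Python) =====
-- def get_max_size_of_row(matrix):
--     """ Function get_max_size_of_row gets a matrix and
--         and returns the size of the longest row in the matrix.
--     """
--     max_len_of_row = len(matrix[0])
--     for row in matrix:
--         if len(row) > max_len_of_row:
--             max_len_of_row = len(row)
--     return max_len_of_row
--
-- def warp_perimeter_of_matrix(matrix, wrapper):
--     """ Function warp_perimeter_of_matrix get an matrix and a wrapper
--         and return a square wrapped-matrix with that wrapper.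
--     """
--     max_size_of_row = get_max_size_of_row(matrix)
--     # creating a new matrix and the first row that contains the wrapper.
--     # "max_size_of_row + 2" because first and last col will also contain the wrapper.
--     wrapped_matrix = [[wrapper] * (max_size_of_row + 2)]
--     for i in range(len(matrix)):
--         # adding new row that has the wrapper in the beginning.
--         wrapped_matrix.append([wrapper])
--         for element in matrix[i]:
--             # adding each element in "matrix" to the "wrapped_matrix".
--             # i + 1 because the first row in the wrapped_matrix is list of wrappers.
--             wrapped_matrix[i + 1].append(element)
--         # adding the wrapper in the end of the row,
--         # in case of non square matrix we fill the empty space in wrappers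
--         # in order to get an square matrix.
--         for j in range(max_size_of_row - len(matrix[i]) + 1):
--             wrapped_matrix[i + 1].append(wrapper)
--
--     # adds the last row of the matrix that contains a list of wrappers.
--     wrapped_matrix.append([wrapper] * (max_size_of_row + 2))
--     return wrapped_matrix
-- ===== SOURCE B (Python) =====
-- def get_max_size_of_row(matrix):
--     max_len_of_row = len(matrix[0])
--     for row in matrix:
--         if len(row) > max_len_of_row:
--             max_len_of_row = len(row)
--     return max_len_of_row
--
-- def warp_perimeter_of_matrix(matrix, wrapper):
--     m = get_max_size_of_row(matrix)
--     # preallocate the whole square-with-border result as wrapper cells,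
--     # then overwrite the interior with the matrix elements.
--     grid = [[wrapper] * (m + 2) for _ in range(len(matrix) + 2)]
--     for i, row in enumerate(matrix):
--         for j, element in enumerate(row):
--             grid[i + 1][j + 1] = element
--     return grid
-- ===== Notes on version B (the rewrite author's own statement) =====
-- stated objective: alternative
-- what changed: Instead of growing each bordered row by repeated appends (element by element plus a padding loop), B preallocates the whole (n+2)-row grid of wrapper cells with list replication and overwrites only the interior cells with the matrix elements.
import Mathlib
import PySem

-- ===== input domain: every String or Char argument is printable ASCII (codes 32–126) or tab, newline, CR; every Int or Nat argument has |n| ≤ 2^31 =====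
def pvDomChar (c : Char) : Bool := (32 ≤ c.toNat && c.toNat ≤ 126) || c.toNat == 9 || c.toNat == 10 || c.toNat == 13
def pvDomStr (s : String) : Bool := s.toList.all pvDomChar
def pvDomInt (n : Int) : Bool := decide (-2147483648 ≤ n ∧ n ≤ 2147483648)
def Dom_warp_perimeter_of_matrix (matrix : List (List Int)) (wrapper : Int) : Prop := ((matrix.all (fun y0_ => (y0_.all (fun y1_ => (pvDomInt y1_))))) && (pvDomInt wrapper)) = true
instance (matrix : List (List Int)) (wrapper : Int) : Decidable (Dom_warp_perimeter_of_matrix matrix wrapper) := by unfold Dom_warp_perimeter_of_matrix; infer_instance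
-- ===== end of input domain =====

-- ===== PORT A =====
-- B preallocates the bordered grid of wrapper cells and overwrites the interior, instead of growing each row by appends (alternative decomposition, same cost).
-- helper of both Pythons: returns none exactly where Python raises IndexError (empty matrix)
def get_max_size_of_row (matrix : List (List Int)) : Option Int :=
  (PySem.List.pyGet? matrix 0).map (fun r0 =>
    matrix.foldl (fun acc row => if (row.length : Int) > acc then (row.length : Int) else acc) (r0.length : Int))

def warp_perimeter_of_matrix (matrix : List (List Int)) (wrapper : Int) : List (List Int) :=
  match get_max_size_of_row matrix with
  | none => []   -- IndexError in Python; excluded by Pre_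
  | some max_size =>
    let wrapped := [List.replicate (max_size + 2).toNat wrapper]
    let wrapped := (PySem.List.pyRange 0 (matrix.length : Int) 1).foldl
      (fun acc i =>
        let row := PySem.List.pyGetD matrix i []
        let newRow := row.foldl (fun r e => r ++ [e]) [wrapper]
        let newRow := (PySem.List.pyRange 0 (max_size - (row.length : Int) + 1) 1).foldl
          (fun r _ => r ++ [wrapper]) newRow
        acc ++ [newRow]) wrapped
    wrapped ++ [List.replicate (max_size + 2).toNat wrapper]

-- ===== PORT B =====
-- inner loop of B: grid-row[j+1] := element for each (j, element) in enumerate(row)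
def pvFillRow : List Int → Nat → List Int → List Int
  | [], _, r => r
  | e :: es, j, r => pvFillRow es (j + 1) (r.set j e)

-- outer loop of B: grid[i+1] := filled row for each (i, row) in enumerate(matrix)
def pvFillGrid : List (List Int) → Nat → List (List Int) → List (List Int)
  | [], _, g => g
  | row :: rest, i, g => pvFillGrid rest (i + 1) (g.set i (pvFillRow row 1 (g.getD i [])))

def warp_perimeter_of_matrix_alt (matrix : List (List Int)) (wrapper : Int) : List (List Int) :=
  match get_max_size_of_row matrix with
  | none => []   -- IndexError in Python; excluded by Pre_
  | some m =>
    let grid := List.replicate (matrix.length + 2) (List.replicate (m + 2).toNat wrapper)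
    pvFillGrid matrix 1 grid

-- ===== PRECONDITION & SPEC =====
-- Pre_ excludes only the empty matrix, on which both Pythons raise IndexError.
def Pre_warp_perimeter_of_matrix (matrix : List (List Int)) (wrapper : Int) : Prop := matrix ≠ []
instance (matrix : List (List Int)) (wrapper : Int) : Decidable (Pre_warp_perimeter_of_matrix matrix wrapper) := by unfold Pre_warp_perimeter_of_matrix; infer_instance
def pvWitness_warp_perimeter_of_matrix : List (List Int) × Int := ([[1, 2], [3]], 0)

def Spec_warp_perimeter_of_matrix (matrix : List (List Int)) (wrapper : Int) (out : List (List Int)) : Prop := out = warp_perimeter_of_matrix_alt matrix wrapper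
instance (matrix : List (List Int)) (wrapper : Int) (out : List (List Int)) : Decidable (Spec_warp_perimeter_of_matrix matrix wrapper out) := by unfold Spec_warp_perimeter_of_matrix; infer_instance

-- ===== CLAIM (what is proved, stated in full; the proofs are below) =====
def Claim_equal_warp_perimeter_of_matrix : Prop := ∀ (matrix : List (List Int)) (wrapper : Int), Dom_warp_perimeter_of_matrix matrix wrapper → Pre_warp_perimeter_of_matrix matrix wrapper → Spec_warp_perimeter_of_matrix matrix wrapper (warp_perimeter_of_matrix matrix wrapper)

-- ===== LEMMAS AND PROOFS =====

-- appending every element of l to base builds base ++ replicate |l| w (A's padding loop)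
theorem pv_foldl_app_const {α β : Type} (l : List β) (w : α) (base : List α) :
    l.foldl (fun r (_ : β) => r ++ [w]) base = base ++ List.replicate l.length w := by
  induction l generalizing base with
  | nil => simp
  | cons x xs ih => simp [List.foldl_cons, ih, List.replicate_succ]

theorem pv_set_mid {α : Type} (pre suf : List α) (x y : α) :
    (pre ++ x :: suf).set pre.length y = pre ++ y :: suf := by
  induction pre with
  | nil => simp
  | cons p ps ih => simp [ih]

theorem pv_getD_mid {α : Type} (pre suf : List α) (x d : α) :
    (pre ++ x :: suf).getD pre.length d = x := by
  induction pre with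
  | nil => simp
  | cons p ps ih => simpa using ih

theorem pv_fillRow_pre : ∀ (row : List Int) (pre : List Int) (n : Nat) (w : Int),
    row.length ≤ n →
    pvFillRow row pre.length (pre ++ List.replicate n w) = pre ++ row ++ List.replicate (n - row.length) w := by
  intro row
  induction row with
  | nil => intro pre n w _; simp [pvFillRow]
  | cons e es ih =>
    intro pre n w h
    obtain ⟨k, rfl⟩ : ∃ k, n = k + 1 := ⟨n - 1, by have := h; simp at this; omega⟩
    have hrep : List.replicate (k + 1) w = w :: List.replicate k w := List.replicate_succ
    rw [pvFillRow, hrep, pv_set_mid pre (List.replicate k w) w e]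
    have hcons : pre ++ e :: List.replicate k w = (pre ++ [e]) ++ List.replicate k w := by simp
    rw [hcons]
    have hlen : (pre ++ [e]).length = pre.length + 1 := by simp
    rw [← hlen, ih (pre ++ [e]) k w (by simpa using h)]
    simp [List.append_assoc]

theorem pv_fillGrid_pre : ∀ (rows : List (List Int)) (pre : List (List Int)) (k : Nat) (R : List Int),
    rows.length ≤ k →
    pvFillGrid rows pre.length (pre ++ List.replicate k R)
      = pre ++ rows.map (fun row => pvFillRow row 1 R) ++ List.replicate (k - rows.length) R := by
  intro rows
  induction rows with
  | nil => intro pre k R _; simp [pvFillGrid]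
  | cons row rest ih =>
    intro pre k R h
    obtain ⟨k', rfl⟩ : ∃ k', k = k' + 1 := ⟨k - 1, by have := h; simp at this; omega⟩
    have hrep : List.replicate (k' + 1) R = R :: List.replicate k' R := List.replicate_succ
    rw [pvFillGrid, hrep, pv_getD_mid pre (List.replicate k' R) R [],
        pv_set_mid pre (List.replicate k' R) R (pvFillRow row 1 R)]
    have hcons : pre ++ pvFillRow row 1 R :: List.replicate k' R
         = (pre ++ [pvFillRow row 1 R]) ++ List.replicate k' R := by simp
    rw [hcons]
    have hlen : (pre ++ [pvFillRow row 1 R]).length = pre.length + 1 := by simp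
    rw [← hlen, ih (pre ++ [pvFillRow row 1 R]) k' R (by simpa using h)]
    simp [List.append_assoc]

-- bounds on A's running maximum
theorem pv_maxstep_init_le : ∀ (l : List (List Int)) (a : Int),
    a ≤ l.foldl (fun acc row => if (row.length : Int) > acc then (row.length : Int) else acc) a := by
  intro l
  induction l with
  | nil => intro a; simp
  | cons r rs ih =>
    intro a
    refine le_trans ?_ (ih _)
    dsimp only []
    split_ifs with h <;> omega

theorem pv_maxstep_mem_le : ∀ (l : List (List Int)) (a : Int) (r : List Int), r ∈ l →
    (r.length : Int) ≤ l.foldl (fun acc row => if (row.length : Int) > acc then (row.length : Int) else acc) a := by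
  intro l
  induction l with
  | nil => intro a r hr; simp at hr
  | cons x xs ih =>
    intro a r hr
    rcases List.mem_cons.mp hr with rfl | hr
    · refine le_trans ?_ (pv_maxstep_init_le xs _)
      dsimp only []
      split_ifs with h <;> omega
    · exact ih _ r hr

theorem warp_main : ∀ (matrix : List (List Int)) (wrapper : Int),
    matrix ≠ [] → warp_perimeter_of_matrix matrix wrapper = warp_perimeter_of_matrix_alt matrix wrapper := by
  intro matrix wrapper hne
  obtain ⟨r0, rest, rfl⟩ := List.exists_cons_of_ne_nil hne
  set mx := r0 :: rest with hmx
  have hget : get_max_size_of_row mx = some (mx.foldl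
      (fun acc row => if (row.length : Int) > acc then (row.length : Int) else acc) (r0.length : Int)) := by
    simp [get_max_size_of_row, hmx, PySem.List.pyGet?, PySem.List.pyIdx?]
  set M : Int := mx.foldl (fun acc row => if (row.length : Int) > acc then (row.length : Int) else acc) (r0.length : Int) with hM
  have hM0 : 0 ≤ M := le_trans (by positivity) (pv_maxstep_init_le mx (r0.length : Int))
  have hle : ∀ r ∈ mx, (r.length : Int) ≤ M := fun r hr => pv_maxstep_mem_le mx _ r hr
  -- A side
  have hA : warp_perimeter_of_matrix mx wrapper
      = List.replicate (M + 2).toNat wrapper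
        :: mx.map (fun row => wrapper :: (row ++ List.replicate (M - (row.length : Int) + 1).toNat wrapper))
        ++ [List.replicate (M + 2).toNat wrapper] := by
    simp only [warp_perimeter_of_matrix, hget]
    rw [PySem.List.foldl_pyRange_zero_pyGetD' mx ([] : List Int)
      (fun acc row => acc ++ [(PySem.List.pyRange 0 (M - (row.length : Int) + 1) 1).foldl
        (fun r _ => r ++ [wrapper]) (row.foldl (fun r e => r ++ [e]) [wrapper])])]
    rw [PySem.List.foldl_append_singleton_eq_map]
    simp only [PySem.List.foldl_append_singleton, pv_foldl_app_const, PySem.List.length_pyRange_one]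
    simp [List.append_assoc]
  -- B side
  have hB : warp_perimeter_of_matrix_alt mx wrapper
      = List.replicate (M + 2).toNat wrapper
        :: mx.map (fun row => pvFillRow row 1 (List.replicate (M + 2).toNat wrapper))
        ++ [List.replicate (M + 2).toNat wrapper] := by
    simp only [warp_perimeter_of_matrix_alt, hget]
    have hsplit : List.replicate (mx.length + 2) (List.replicate (M + 2).toNat wrapper)
        = [List.replicate (M + 2).toNat wrapper] ++ List.replicate (mx.length + 1) (List.replicate (M + 2).toNat wrapper) := by
      rw [show mx.length + 2 = 1 + (mx.length + 1) by omega, List.replicate_add]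
      rfl
    rw [hsplit]
    have h := pv_fillGrid_pre mx [List.replicate (M + 2).toNat wrapper]
      (mx.length + 1) (List.replicate (M + 2).toNat wrapper) (by omega)
    rw [show mx.length + 1 - mx.length = 1 by omega] at h
    simpa using h
  rw [hA, hB]
  congr 1
  congr 1
  apply List.map_congr_left
  intro row hrow
  have hlen : (row.length : Int) ≤ M := hle row hrow
  have hrep : List.replicate (M + 2).toNat wrapper
      = [wrapper] ++ List.replicate ((M + 2).toNat - 1) wrapper := by
    conv_lhs => rw [show (M + 2).toNat = 1 + ((M + 2).toNat - 1) by omega, List.replicate_add]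
    rfl
  have hfill : pvFillRow row 1 (List.replicate (M + 2).toNat wrapper)
      = [wrapper] ++ row ++ List.replicate ((M + 2).toNat - 1 - row.length) wrapper := by
    rw [hrep]
    have h := pv_fillRow_pre row [wrapper] ((M + 2).toNat - 1) wrapper (by omega)
    simpa using h
  rw [hfill]
  have harith : (M - (row.length : Int) + 1).toNat = (M + 2).toNat - 1 - row.length := by omega
  simp [harith]

-- ===== VERDICT (by name: the statement is the Claim_ definition above) =====
theorem warp_perimeter_of_matrix_spec : Claim_equal_warp_perimeter_of_matrix := by
  intro matrix wrapper _ hpre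
  exact warp_main matrix wrapper hpre
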